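-- pv_equiv track=rewrite | github.com/ikokkari/PythonProblems | labs109.py | __twos_and_threes
-- ===== SOURCE A (Python) =====
-- def __twos_and_threes(n):
--     if n == 0:
--         return []
--     elif n == 1:
--         return [(0, 0)]
--     elif n % 2 == 0:
--         return [(a+1, b) for (a, b) in __twos_and_threes(n // 2)]
--     else:
--         k, p = 1, 3
--         while p <= n:
--             k, p = k + 1, p * 3
--         p, k = p // 3, k-1
--         return [(0, k)] + [(a+1, b) for (a, b) in __twos_and_threes((n - p) // 2)]
-- ===== SOURCE B (Python) =====
-- def __twos_and_threes(n):
--     result, depth = [], 0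
--     while n > 0:
--         if n % 2 == 0:
--             n //= 2
--         else:
--             p, k = 1, 0
--             while p * 3 <= n:
--                 p, k = p * 3, k + 1
--             result.append((depth, k))
--             n = (n - p) // 2
--         depth += 1
--     return result
-- ===== Notes on version B (the rewrite author's own statement) =====
-- stated objective: alternative
-- what changed: Replaces the recursion (which rebuilds and shifts every pair's first component with a list comprehension at each level) by a single iterative loop that keeps a depth counter and appends each (depth, k) pair once, so no pair is ever rewritten.
import Mathlib
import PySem

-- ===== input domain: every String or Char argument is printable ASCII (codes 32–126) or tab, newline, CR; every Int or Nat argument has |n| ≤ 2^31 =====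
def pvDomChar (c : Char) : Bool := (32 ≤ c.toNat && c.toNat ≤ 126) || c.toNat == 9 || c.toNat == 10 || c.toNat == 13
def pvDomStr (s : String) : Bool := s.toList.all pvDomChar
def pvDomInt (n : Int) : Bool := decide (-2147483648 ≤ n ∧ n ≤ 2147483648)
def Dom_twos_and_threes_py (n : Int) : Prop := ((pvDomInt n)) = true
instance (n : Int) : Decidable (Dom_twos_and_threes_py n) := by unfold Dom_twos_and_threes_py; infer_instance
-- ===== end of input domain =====

-- B is an iterative rewrite (depth counter + append) of A's recursion; equal return values on n ≥ 0.

-- ===== PORT A =====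
-- A's inner 'while p <= n: k, p = k+1, p*3' loop; fuel only makes it total (n.toNat iterations suffice on Pre_).
def pvA_pow3 (fuel : Nat) (k p n : Int) : Int × Int :=
  match fuel with
  | 0 => (k, p)
  | f + 1 => if p ≤ n then pvA_pow3 f (k + 1) (p * 3) n else (k, p)

-- A's recursion, with fuel as the totality device (n.toNat + 1 suffices on Pre_: n strictly decreases).
def pvA_rec (fuel : Nat) (n : Int) : List (Int × Int) :=
  match fuel with
  | 0 => []
  | f + 1 =>
    if n = 0 then []
    else if n = 1 then [(0, 0)]
    else if PySem.Int.mod n 2 = 0 then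
      (pvA_rec f (PySem.Int.floordiv n 2)).map (fun ab => (ab.1 + 1, ab.2))
    else
      let kp := pvA_pow3 n.toNat 1 3 n
      let p := PySem.Int.floordiv kp.2 3
      let k := kp.1 - 1
      (0, k) :: (pvA_rec f (PySem.Int.floordiv (n - p) 2)).map (fun ab => (ab.1 + 1, ab.2))

def twos_and_threes_py (n : Int) : List (Int × Int) := pvA_rec (n.toNat + 1) n

-- ===== PORT B =====
-- B's inner 'while p * 3 <= n: p, k = p*3, k+1' loop.
def pvB_pow3 (fuel : Nat) (p k n : Int) : Int × Int :=
  match fuel with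
  | 0 => (p, k)
  | f + 1 => if p * 3 ≤ n then pvB_pow3 f (p * 3) (k + 1) n else (p, k)

-- B's main 'while n > 0' loop with depth counter and result accumulator.
def pvB_loop (fuel : Nat) (n depth : Int) (result : List (Int × Int)) : List (Int × Int) :=
  match fuel with
  | 0 => result
  | f + 1 =>
    if 0 < n then
      if PySem.Int.mod n 2 = 0 then
        pvB_loop f (PySem.Int.floordiv n 2) (depth + 1) result
      else
        let pk := pvB_pow3 n.toNat 1 0 n
        pvB_loop f (PySem.Int.floordiv (n - pk.1) 2) (depth + 1) (result ++ [(depth, pk.2)])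
    else result

def twos_and_threes_py_alt (n : Int) : List (Int × Int) := pvB_loop (n.toNat + 1) n 0 []

-- ===== PRECONDITION & SPEC =====
-- Pre_ excludes exactly the negative inputs, on which A recurses forever (RecursionError).
def Pre_twos_and_threes_py (n : Int) : Prop := 0 ≤ n
instance (n : Int) : Decidable (Pre_twos_and_threes_py n) := by unfold Pre_twos_and_threes_py; infer_instance
def pvWitness_twos_and_threes_py : Int := (100)

def Spec_twos_and_threes_py (n : Int) (out : List (Int × Int)) : Prop := out = twos_and_threes_py_alt n
instance (n : Int) (out : List (Int × Int)) : Decidable (Spec_twos_and_threes_py n out) := by unfold Spec_twos_and_threes_py; infer_instance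

-- ===== CLAIM (what is proved, stated in full; the proofs are below) =====
def Claim_equal_twos_and_threes_py : Prop := ∀ (n : Int), Dom_twos_and_threes_py n → Pre_twos_and_threes_py n → Spec_twos_and_threes_py n (twos_and_threes_py n)

-- ===== LEMMAS AND PROOFS =====

-- B's search state (p,k) corresponds to A's search state (k+1, p*3), step for step.
lemma pow3_rel (f : Nat) : ∀ p k n : Int,
    pvB_pow3 f p k n = (PySem.Int.floordiv (pvA_pow3 f (k + 1) (p * 3) n).2 3, (pvA_pow3 f (k + 1) (p * 3) n).1 - 1) := by
  induction f with
  | zero =>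
    intro p k n
    simp [pvB_pow3, pvA_pow3]
  | succ f ih =>
    intro p k n
    simp only [pvB_pow3, pvA_pow3]
    by_cases h : p * 3 ≤ n
    · rw [if_pos h, if_pos h, ih (p * 3) (k + 1) n]
    · rw [if_neg h, if_neg h]
      simp

-- B's search keeps 1 ≤ p ≤ n.
lemma pow3_bounds (f : Nat) : ∀ p k n : Int, 1 ≤ p → p ≤ n →
    1 ≤ (pvB_pow3 f p k n).1 ∧ (pvB_pow3 f p k n).1 ≤ n := by
  induction f with
  | zero => intro p k n h1 h2; simp [pvB_pow3]; omega
  | succ f ih =>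
    intro p k n h1 h2
    simp only [pvB_pow3]
    by_cases h : p * 3 ≤ n
    · rw [if_pos h]; exact ih (p * 3) (k + 1) n (by omega) h
    · rw [if_neg h]; exact ⟨h1, h2⟩

lemma shift_shift (L : List (Int × Int)) (a b : Int) :
    (L.map (fun x => (x.1 + a, x.2))).map (fun x => (x.1 + b, x.2)) = L.map (fun x => (x.1 + (a + b), x.2)) := by
  induction L with
  | nil => simp
  | cons x xs ih => simp [ih]; ring

lemma map_shift_congr (L : List (Int × Int)) (a b : Int) (h : a = b) :
    L.map (fun x => (x.1 + a, x.2)) = L.map (fun x => (x.1 + b, x.2)) := by rw [h]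

-- B's loop is a no-op once n reaches 0, whatever the remaining fuel.
lemma loop_zero (f : Nat) (depth : Int) (acc : List (Int × Int)) : pvB_loop f 0 depth acc = acc := by
  cases f <;> simp [pvB_loop]

-- One-step unfolding of B's loop (avoids simp unfolding several iterations at once).
lemma loop_step (f : Nat) (n depth : Int) (acc : List (Int × Int)) :
    pvB_loop (f + 1) n depth acc =
      if 0 < n then
        if PySem.Int.mod n 2 = 0 then
          pvB_loop f (PySem.Int.floordiv n 2) (depth + 1) acc
        else
          pvB_loop f (PySem.Int.floordiv (n - (pvB_pow3 n.toNat 1 0 n).1) 2) (depth + 1)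
            (acc ++ [(depth, (pvB_pow3 n.toNat 1 0 n).2)])
      else acc := rfl

-- Main invariant: B's loop appends A's result, first components shifted by the current depth.
lemma main_rel (m : Nat) : ∀ n : Int, 0 ≤ n → n.toNat ≤ m → ∀ depth acc,
    pvB_loop (m + 1) n depth acc = acc ++ (pvA_rec (m + 1) n).map (fun ab => (ab.1 + depth, ab.2)) := by
  induction m with
  | zero =>
    intro n hn hm depth acc
    have : n = 0 := by omega
    subst this
    simp [pvB_loop, pvA_rec]
  | succ m ih =>
    intro n hn hm depth acc
    by_cases h0 : n = 0
    · subst h0; simp [pvB_loop, pvA_rec]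
    have hpos : (0:Int) < n := by omega
    have hmodeq : PySem.Int.mod n 2 = n % 2 := PySem.Int.mod_eq_emod_of_pos (by norm_num)
    have hfd2 : ∀ a : Int, PySem.Int.floordiv a 2 = a / 2 :=
      fun a => PySem.Int.floordiv_eq_ediv_of_pos (by norm_num)
    by_cases h1 : n = 1
    · subst h1
      have he1 : ¬ (PySem.Int.mod 1 2 = 0) := by decide
      have hsearch : pvB_pow3 (Int.toNat 1) 1 0 1 = (1, 0) := by decide
      simp only [pvB_loop, pvA_rec, if_pos hpos, if_neg h0, if_neg he1, hsearch, hfd2]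
      norm_num [loop_zero]
    by_cases he : PySem.Int.mod n 2 = 0
    · -- even branch
      have hmod : n % 2 = 0 := by omega
      rw [show pvB_loop (m + 1 + 1) n depth acc = pvB_loop (m + 1) (n / 2) (depth + 1) acc from by
        simp only [pvB_loop]; rw [if_pos hpos, if_pos he, hfd2]]
      rw [show pvA_rec (m + 1 + 1) n
            = (pvA_rec (m + 1) (n / 2)).map (fun ab => (ab.1 + 1, ab.2)) from by
        simp only [pvA_rec]; rw [if_neg h0, if_neg h1, if_pos he, hfd2]]
      rw [ih (n / 2) (by omega) (by omega) (depth + 1) acc, shift_shift,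
        map_shift_congr _ (depth + 1) (1 + depth) (by ring)]
    · -- odd branch, n ≥ 3
      have hmod : n % 2 = 1 := by omega
      have hfd3 : ∀ a : Int, PySem.Int.floordiv a 3 = a / 3 :=
        fun a => PySem.Int.floordiv_eq_ediv_of_pos (by norm_num)
      have hrel := pow3_rel n.toNat 1 0 n
      norm_num at hrel
      have hb := pow3_bounds n.toNat 1 0 n (by omega) (by omega)
      rw [hrel] at hb
      simp only at hb
      set p := (pvA_pow3 n.toNat 1 3 n).2 / 3 with hp
      set k := (pvA_pow3 n.toNat 1 3 n).1 - 1 with hk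
      obtain ⟨hb1, hb2⟩ := hb
      have hstep : pvA_rec (m + 1 + 1) n
          = (0, k) :: (pvA_rec (m + 1) ((n - p) / 2)).map (fun ab => (ab.1 + 1, ab.2)) := by
        simp only [pvA_rec]
        rw [if_neg h0, if_neg h1, if_neg he, hfd3, hfd2]
      rw [loop_step, if_pos hpos, if_neg he, hrel]
      simp only
      rw [hfd2, ih ((n - p) / 2) (by omega) (by omega) (depth + 1) (acc ++ [(depth, k)]), hstep]
      simp [List.append_assoc]
      intro a b _
      ring

-- ===== VERDICT (by name: the statement is the Claim_ definition above) =====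
theorem twos_and_threes_py_spec : Claim_equal_twos_and_threes_py := by
  intro n _ hpre
  unfold Spec_twos_and_threes_py twos_and_threes_py twos_and_threes_py_alt
  rw [main_rel n.toNat n hpre (le_refl _) 0 []]
  simp
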